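-- pv_equiv track=rewrite | github.com/pytorch/PiPPy | spmd/tensor/ops/tags/view_ops.py | dim_movedim
-- ===== SOURCE A (Python) =====
-- def dim_movedim(shape_len, input, destination):
--     if not isinstance(input, tuple):
--         input = (input, )
--     if not isinstance(destination, tuple):
--         destination = (destination, )
--
--     assert len(input) == len(destination)
--     input_set = set(input)
--     assert len(input_set) == len(input), 'Found repeated input dims'
--     assert len(set(destination)) == len(destination), 'Found repeated output dims'
--     assert max(input) < shape_len
--     assert max(destination) < shape_len
--
--     dest = [-1, ] * shape_len
--     for i, d in zip(input, destination):
--         dest[d] = i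
--
--     unused_inputs_iter = iter(i for i in range(shape_len) if i not in input_set)
--     for i in range(shape_len):
--         if dest[i] == -1:
--             dest[i] = next(unused_inputs_iter)
--
--     return tuple(dest)
-- ===== SOURCE B (Python) =====
-- def dim_movedim(shape_len, input, destination):
--     if not isinstance(input, tuple):
--         input = (input, )
--     if not isinstance(destination, tuple):
--         destination = (destination, )
--
--     assert len(input) == len(destination)
--     input_set = set(input)
--     assert len(input_set) == len(input), 'Found repeated input dims'
--     assert len(set(destination)) == len(destination), 'Found repeated output dims'
--     assert max(input) < shape_len
--     assert max(destination) < shape_len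
--
--     # numpy.moveaxis style: list the unmoved dims in order, then splice each moved
--     # dim in at its (normalized) destination, in increasing destination order.
--     order = [s for s in range(shape_len) if s not in input_set]
--     moved = sorted(((d % shape_len, s) for s, d in zip(input, destination)),
--                    key=lambda pair: pair[0])
--     for d, s in moved:
--         order.insert(d, s)
--     return tuple(order)
-- ===== Notes on version B (the rewrite author's own statement) =====
-- stated objective: alternative
-- what changed: B builds the result numpy.moveaxis-style: it lists the unmoved dims in order and then splices each moved dim into that list at its normalized destination (list.insert, in increasing destination order), instead of A's sentinel-filled array written by destination index and then re-scanned left-to-right pulling replacements from a lazy iterator of unused inputs.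
-- outside the precondition, e.g. on dim_movedim(3, (-1,), (2,)): A returns (0, 1, 2), B returns (0, 1, -1, 2); on dim_movedim(3, (-2,), (0,)): A returns (-2, 0, 1), B returns (-2, 0, 1, 2)
import Mathlib
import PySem

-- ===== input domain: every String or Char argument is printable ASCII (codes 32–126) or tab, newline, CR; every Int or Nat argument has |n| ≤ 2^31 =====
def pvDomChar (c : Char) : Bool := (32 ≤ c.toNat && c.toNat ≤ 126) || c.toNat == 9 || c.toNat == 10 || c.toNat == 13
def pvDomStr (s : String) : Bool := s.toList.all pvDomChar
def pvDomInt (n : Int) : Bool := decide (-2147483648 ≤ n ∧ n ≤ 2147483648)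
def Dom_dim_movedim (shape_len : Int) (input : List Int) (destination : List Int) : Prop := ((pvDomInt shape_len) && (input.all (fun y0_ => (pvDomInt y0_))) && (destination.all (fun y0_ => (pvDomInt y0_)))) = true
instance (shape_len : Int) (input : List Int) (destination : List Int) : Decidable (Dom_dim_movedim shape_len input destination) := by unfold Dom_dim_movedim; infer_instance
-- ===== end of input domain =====

set_option maxHeartbeats 1000000


-- B rebuilds the permutation numpy.moveaxis-style — list the unmoved dims, then splice each
-- moved dim in at its (normalized) destination in increasing destination order — instead of
-- A's sentinel-array fill followed by a scan pulling from a lazy iterator of unused inputs.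
-- Return-value equivalence only; neither version mutates its arguments.

-- ===== PORT A =====
-- the Python asserts and the raising corners (bad index, exhausted iterator) are excluded by Pre_dim_movedim
def dim_movedim (shape_len : Int) (input : List Int) (destination : List Int) : List Int :=
  let inputSet : PySem.Set Int := PySem.Set.ofList input
  let dest0 : List Int := List.replicate shape_len.toNat (-1)
  let dest1 : List Int := (input.zip destination).foldl
    (fun dest q => PySem.List.pySetD dest q.2 q.1) dest0
  let unused : List Int := (PySem.List.pyRange 0 shape_len 1).filter
    (fun i => !(PySem.Set.contains inputSet i))
  let st := (PySem.List.pyRange 0 shape_len 1).foldl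
    (fun (st : List Int × List Int) i =>
      if PySem.List.pyGetD st.1 i 0 == -1 then
        (PySem.List.pySetD st.1 i (st.2.headD 0), st.2.tail)
      else st) (dest1, unused)
  st.1

-- ===== PORT B =====
def dim_movedim_alt (shape_len : Int) (input : List Int) (destination : List Int) : List Int :=
  let inputSet : PySem.Set Int := PySem.Set.ofList input
  let order : List Int := (PySem.List.pyRange 0 shape_len 1).filter
    (fun s => !(PySem.Set.contains inputSet s))
  let moved : List (Int × Int) := PySem.List.sorted
    ((input.zip destination).map (fun q => (PySem.Int.mod q.2 shape_len, q.1)))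
    (fun pair => pair.1)
  moved.foldl (fun ord q => PySem.List.insert ord q.1 q.2) order

-- ===== PRECONDITION & SPEC =====
-- Pre_ excludes the inputs on which the Python A raises (length/duplicate asserts, empty-tuple
-- max, a destination outside [-shape_len, shape_len) (IndexError), two destinations equal modulo
-- shape_len (StopIteration)) and — a stated narrowing to the function's natural domain of
-- normalized dims — inputs with a NEGATIVE source dim, on which A still returns, embedding the
-- raw negative value in the returned permutation (and silently dropping a source equal to -1,
-- A's sentinel); B returns a different value there.
def Pre_dim_movedim (shape_len : Int) (input : List Int) (destination : List Int) : Prop :=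
  input ≠ [] ∧ input.length = destination.length ∧
  input.Nodup ∧ destination.Nodup ∧
  (∀ i ∈ input, 0 ≤ i ∧ i < shape_len) ∧
  (∀ d ∈ destination, -shape_len ≤ d ∧ d < shape_len) ∧
  (destination.map (fun d => PySem.Int.mod d shape_len)).Nodup

instance (shape_len : Int) (input : List Int) (destination : List Int) : Decidable (Pre_dim_movedim shape_len input destination) := by unfold Pre_dim_movedim; infer_instance

def pvWitness_dim_movedim : Int × List Int × List Int := (3, [0], [2])

def Spec_dim_movedim (shape_len : Int) (input : List Int) (destination : List Int) (out : List Int) : Prop := out = dim_movedim_alt shape_len input destination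
instance (shape_len : Int) (input : List Int) (destination : List Int) (out : List Int) : Decidable (Spec_dim_movedim shape_len input destination out) := by unfold Spec_dim_movedim; infer_instance

-- ===== CLAIM (what is proved, stated in full; the proofs are below) =====
def Claim_equal_dim_movedim : Prop := ∀ (shape_len : Int) (input : List Int) (destination : List Int), Dom_dim_movedim shape_len input destination → Pre_dim_movedim shape_len input destination → Spec_dim_movedim shape_len input destination (dim_movedim shape_len input destination)

-- ===== LEMMAS AND PROOFS =====

-- Python negative-index assignment xs[i] = v wraps: for -len ≤ i < 0 it writes len+i
theorem pySetD_neg {α : Type} (xs : List α) (i : Int) (v : α)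
    (h1 : -(xs.length : Int) ≤ i) (h2 : i < 0) :
    PySem.List.pySetD xs i v = xs.set (xs.length - (-i).toNat) v := by
  simp only [PySem.List.pySetD, PySem.List.pySet?, PySem.List.pyIdx?]
  rw [if_neg (by omega), if_pos (by omega)]
  rfl

-- wrap as floor-mod: pySetD at an in-range index i writes position (i mod len)
theorem pySetD_eq_set_mod {α : Type} (xs : List α) (i : Int) (v : α)
    (h1 : -(xs.length : Int) ≤ i) (h2 : i < (xs.length : Int)) (h3 : 0 < xs.length) :
    PySem.List.pySetD xs i v = xs.set (PySem.Int.mod i (xs.length : Int)).toNat v := by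
  rw [PySem.Int.mod_eq_emod_of_pos (by exact_mod_cast h3 : (0:Int) < (xs.length : Int))]
  by_cases hi : 0 ≤ i
  · rw [PySem.List.pySetD_of_nonneg _ _ hi]
    rw [Int.emod_eq_of_lt hi h2]
  · rw [pySetD_neg xs i v h1 (by omega)]
    have hmod : i % (xs.length : Int) = i + xs.length := by
      rw [← Int.add_emod_right]
      exact Int.emod_eq_of_lt (by omega) (by omega)
    rw [hmod]
    congr 1
    omega

-- value at position k after the write loop: the last source whose destination
-- normalizes to k, or the initial array's value
theorem fold_pySetD_getElem? (n : Int) (zs : List (Int × Int)) (dest : List Int) (k : Nat)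
    (hn : (dest.length : Int) = n)
    (hz : ∀ q ∈ zs, -n ≤ q.2 ∧ q.2 < n) :
    (zs.foldl (fun dest q => PySem.List.pySetD dest q.2 q.1) dest).length = dest.length ∧
    ((k < dest.length) →
      (zs.foldl (fun dest q => PySem.List.pySetD dest q.2 q.1) dest)[k]? =
      (((zs.filter (fun q => PySem.Int.mod q.2 n == (k : Int))).map Prod.fst).getLast?).or dest[k]?) := by
  induction zs using List.reverseRecOn with
  | nil => simp
  | append_singleton zs q ih =>
    have hq : -n ≤ q.2 ∧ q.2 < n := hz q (by simp)
    obtain ⟨ihlen, ihget⟩ := ih (fun r hr => hz r (by simp [hr]))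
    have hFlen : (((zs.foldl (fun dest q => PySem.List.pySetD dest q.2 q.1) dest)).length : Int) = n := by
      rw [ihlen]; exact hn
    have hnpos : 0 < n := by omega
    rw [List.foldl_append, List.foldl_cons, List.foldl_nil]
    rw [pySetD_eq_set_mod _ q.2 q.1 (by omega) (by omega) (by omega)]
    have hmem : PySem.Int.mod q.2 ((zs.foldl (fun dest q => PySem.List.pySetD dest q.2 q.1) dest).length : Int)
        = PySem.Int.mod q.2 n := by rw [hFlen]
    rw [hmem]
    have hmeq : PySem.Int.mod q.2 n = q.2 % n := PySem.Int.mod_eq_emod_of_pos hnpos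
    have hm0 : 0 ≤ PySem.Int.mod q.2 n := by rw [hmeq]; exact Int.emod_nonneg _ (by omega)
    have hmlt : PySem.Int.mod q.2 n < n := by rw [hmeq]; exact Int.emod_lt_of_pos _ hnpos
    refine ⟨by rw [List.length_set, ihlen], ?_⟩
    intro hk
    rw [List.filter_append, List.map_append]
    by_cases hpk : PySem.Int.mod q.2 n = (k : Int)
    · have htn : (PySem.Int.mod q.2 n).toNat = k := by omega
      rw [htn]
      rw [List.getElem?_set_self' ]
      have hkF : k < (zs.foldl (fun dest q => PySem.List.pySetD dest q.2 q.1) dest).length := by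
        rw [ihlen]; exact hk
      have hfq : (List.filter (fun q => PySem.Int.mod q.2 n == (k : Int)) [q]) = [q] := by
        simp [hpk]
      rw [hfq]
      simp [hkF]
    · have htn : (PySem.Int.mod q.2 n).toNat ≠ k := by omega
      rw [List.getElem?_set_ne htn]
      have hfq : (List.filter (fun q => PySem.Int.mod q.2 n == (k : Int)) [q]) = [] := by
        simp [hpk]
      rw [hfq]
      simp only [List.map_nil, List.append_nil]
      exact ihget hk

-- A's interleaved scan-and-consume loop equals assigning zip(u, holes) pairs,
-- when there are at least as many spare sources as holes
theorem scan_eq_zip_assign (l : List Int) (arr u : List Int)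
    (hnd : l.Nodup)
    (hidx : ∀ i ∈ l, 0 ≤ i ∧ i < (arr.length : Int))
    (hlen : (l.filter (fun i => PySem.List.pyGetD arr i 0 == -1)).length ≤ u.length) :
    (l.foldl (fun (st : List Int × List Int) i =>
        if PySem.List.pyGetD st.1 i 0 == -1 then
          (PySem.List.pySetD st.1 i (st.2.headD 0), st.2.tail)
        else st) (arr, u)).1 =
    ((u.zip (l.filter (fun i => PySem.List.pyGetD arr i 0 == -1))).foldl
        (fun pl q => PySem.List.pySetD pl q.2 q.1) arr) := by
  induction l generalizing arr u with
  | nil => simp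
  | cons i l ih =>
    have hi := hidx i List.mem_cons_self
    have hnd' : l.Nodup := hnd.of_cons
    have hnotmem : i ∉ l := (List.nodup_cons.mp hnd).1
    rw [List.foldl_cons]
    by_cases hc : (PySem.List.pyGetD arr i 0 == -1) = true
    · rw [if_pos hc]
      have hfl : (List.filter (fun j => PySem.List.pyGetD arr j 0 == -1) (i :: l)) =
          i :: List.filter (fun j => PySem.List.pyGetD arr j 0 == -1) l := by
        simp [hc]
      rw [hfl] at hlen ⊢
      cases u with
      | nil => simp at hlen
      | cons u0 u' =>
        simp only [List.headD_cons, List.tail_cons, List.zip_cons_cons, List.foldl_cons]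
        have harr' : PySem.List.pySetD arr i u0 = arr.set i.toNat u0 :=
          PySem.List.pySetD_of_nonneg _ _ hi.1
        have hlen' : (PySem.List.pySetD arr i u0).length = arr.length := by
          rw [harr', List.length_set]
        have hfeq : List.filter (fun j => PySem.List.pyGetD (PySem.List.pySetD arr i u0) j 0 == -1) l =
            List.filter (fun j => PySem.List.pyGetD arr j 0 == -1) l := by
          apply List.filter_congr
          intro j hj
          have hji : j ≠ i := fun h => hnotmem (h ▸ hj)
          have hjb := hidx j (List.mem_cons_of_mem _ hj)
          have h1 : PySem.List.pyGetD (PySem.List.pySetD arr i u0) j 0 = PySem.List.pyGetD arr j 0 := by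
            have hi' : i = ((i.toNat : Nat) : Int) := by omega
            have hj' : j = ((j.toNat : Nat) : Int) := by omega
            rw [hi', hj']
            rw [PySem.List.pyGetD_pySetD_natCast arr i.toNat j.toNat u0 0 (by omega)]
            rw [if_neg (by omega)]
          rw [h1]
        have hih := ih (PySem.List.pySetD arr i u0) u' hnd'
          (fun j hj => by
            rw [hlen']
            exact hidx j (List.mem_cons_of_mem _ hj))
          (by rw [hfeq]; simpa using hlen)
        rw [hih, hfeq]
    · rw [if_neg hc]
      have hfl : (List.filter (fun j => PySem.List.pyGetD arr j 0 == -1) (i :: l)) =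
          List.filter (fun j => PySem.List.pyGetD arr j 0 == -1) l := by
        simp [hc]
      rw [hfl] at hlen ⊢
      exact ih arr u hnd' (fun j hj => hidx j (List.mem_cons_of_mem _ hj)) hlen

-- python `s not in set(input)` is `s ∉ input`
theorem spare_filter_eq (n : Int) (input : List Int) :
    List.filter (fun s => !(decide (s ∈ input))) (PySem.List.pyRange 0 n 1) =
      List.filter (fun s => !(PySem.Set.contains (PySem.Set.ofList input) s)) (PySem.List.pyRange 0 n 1) := by
  apply List.filter_congr
  intro s _
  have hceq : PySem.Set.contains (PySem.Set.ofList input) s = decide (s ∈ input) := by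
    by_cases h : s ∈ input
    · simp only [h, decide_true]
      exact (PySem.Set.contains_iff _ _).mpr ((PySem.Set.mem_ofList _ _).mpr h)
    · simp only [h, decide_false]
      by_contra hc
      exact h ((PySem.Set.mem_ofList _ _).mp ((PySem.Set.contains_iff _ _).mp (by
        cases hcv : PySem.Set.contains (PySem.Set.ofList input) s
        · exact absurd hcv hc
        · rfl)))
  rw [hceq]

-- on a pair list with distinct first components, filtering on one first component
-- yields exactly the matching pair
theorem filter_fst_eq_singleton (L : List (Int × Int)) (c : Int)
    (hnd : (L.map Prod.fst).Nodup) (q : Int × Int) (hq : q ∈ L) (hqc : q.1 = c) :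
    L.filter (fun r => r.1 == c) = [q] := by
  induction L with
  | nil => simp at hq
  | cons a l ih =>
    rw [List.map_cons, List.nodup_cons] at hnd
    rcases List.mem_cons.mp hq with rfl | hql
    · rw [List.filter_cons, if_pos (by simp [hqc])]
      have hnil : l.filter (fun r => r.1 == c) = [] := by
        rw [List.filter_eq_nil_iff]
        intro r hr
        simp only [beq_iff_eq]
        intro hrc
        apply hnd.1
        rw [hqc, ← hrc]
        exact List.mem_map_of_mem hr
      rw [hnil]
    · have hac : ¬(a.1 == c) = true := by
        simp only [beq_iff_eq]
        intro h
        apply hnd.1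
        rw [h, ← hqc]
        exact List.mem_map_of_mem hql
      rw [List.filter_cons, if_neg hac]
      exact ih hnd.2 hql

-- the insert loop of B: value at each position of the spliced list
theorem insert_fold_char (pairs : List (Int × Int)) (base : List Int)
    (hsort : pairs.Pairwise (fun a b => a.1 < b.1))
    (h0 : ∀ q ∈ pairs, 0 ≤ q.1)
    (hbnd : ∀ j (hj : j < pairs.length), pairs[j].1 ≤ (base.length : Int) + j) :
    (pairs.foldl (fun l q => PySem.List.insert l q.1 q.2) base).length = base.length + pairs.length ∧
    ∀ p : Nat,
      (pairs.foldl (fun l q => PySem.List.insert l q.1 q.2) base)[p]? =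
        ((pairs.find? (fun q => q.1 == (p : Int))).map Prod.snd).or
          (base[p - pairs.countP (fun q => decide (q.1 < (p : Int)))]?) := by
  induction pairs using List.reverseRecOn with
  | nil => simp
  | append_singleton rest q ih =>
    have hlapp : (rest ++ [q]).length = rest.length + 1 := by simp
    obtain ⟨hrs, hql⟩ : rest.Pairwise (fun a b => a.1 < b.1) ∧ ∀ a ∈ rest, a.1 < q.1 := by
      rw [List.pairwise_append] at hsort
      exact ⟨hsort.1, fun a ha => hsort.2.2 a ha q (by simp)⟩
    have hq0 : 0 ≤ q.1 := h0 q (by simp)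
    obtain ⟨ihlen, ihget⟩ := ih hrs (fun r hr => h0 r (by simp [hr]))
      (fun j hj => by
        have := hbnd j (by omega)
        rwa [List.getElem_append_left hj] at this)
    have hqbnd : q.1 ≤ (base.length : Int) + rest.length := by
      have h := hbnd rest.length (by omega)
      rw [List.getElem_append_right (le_refl _)] at h
      simpa using h
    rw [List.foldl_append, List.foldl_cons, List.foldl_nil]
    generalize hFdef : rest.foldl (fun l q => PySem.List.insert l q.1 q.2) base = F at ihlen ihget ⊢
    have ht : ((q.1.toNat : Nat) : Int) = q.1 := by omega
    have htF : q.1.toNat ≤ F.length := by omega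
    rw [← ht, PySem.List.insert_natCast F q.1.toNat q.2 htF]
    have htake : (F.take q.1.toNat).length = q.1.toNat := by
      rw [List.length_take]; omega
    have hlen2 : (F.take q.1.toNat ++ q.2 :: F.drop q.1.toNat).length = base.length + (rest ++ [q]).length := by
      rw [List.length_append, List.length_cons, List.length_drop, htake, hlapp, ihlen]
      omega
    refine ⟨hlen2, ?_⟩
    intro p
    rw [List.find?_append, List.countP_append]
    rcases Nat.lt_trichotomy p q.1.toNat with hpt | hpt | hpt
    · -- p < q.1.toNat : untouched prefix
      have hget : (F.take q.1.toNat ++ q.2 :: F.drop q.1.toNat)[p]? = F[p]? := by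
        rw [List.getElem?_append_left (by omega)]
        exact List.getElem?_take_of_lt hpt
      have hb : (q.1 == (p : Int)) = false := by
        rw [beq_eq_false_iff_ne]; omega
      have hfq : List.find? (fun r => r.1 == (p : Int)) [q] = none := by
        simp [List.find?, hb]
      have hcq : List.countP (fun r => decide (r.1 < (p : Int))) [q] = 0 := by
        simp only [List.countP_cons, List.countP_nil]
        rw [if_neg (by simp only [decide_eq_true_eq]; omega)]
      rw [hget, hfq, hcq, Option.or_none, Nat.add_zero]
      exact ihget p
    · -- p = q.1.toNat : the inserted element
      have hget : (F.take q.1.toNat ++ q.2 :: F.drop q.1.toNat)[p]? = some q.2 := by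
        rw [List.getElem?_append_right (by omega)]
        rw [htake, hpt, Nat.sub_self]
        rfl
      have hfr : List.find? (fun r => r.1 == (p : Int)) rest = none := by
        rw [List.find?_eq_none]
        intro a ha
        have := hql a ha
        simp only [beq_iff_eq]
        omega
      have hb : (q.1 == (p : Int)) = true := by
        rw [beq_iff_eq]; omega
      have hfq : List.find? (fun r => r.1 == (p : Int)) [q] = some q := by
        simp [List.find?, hb]
      rw [hget, hfr, hfq]
      rfl
    · -- p > q.1.toNat : shifted suffix
      have hget : (F.take q.1.toNat ++ q.2 :: F.drop q.1.toNat)[p]? = F[p-1]? := by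
        rw [List.getElem?_append_right (by omega)]
        rw [htake]
        have hp1 : p - q.1.toNat = (p - q.1.toNat - 1) + 1 := by omega
        rw [hp1]
        simp only [List.getElem?_cons_succ]
        rw [List.getElem?_drop]
        congr 1
        omega
      have hfr : List.find? (fun r => r.1 == (p : Int)) rest = none := by
        rw [List.find?_eq_none]
        intro a ha
        have := hql a ha
        simp only [beq_iff_eq]
        omega
      have hb : (q.1 == (p : Int)) = false := by
        rw [beq_eq_false_iff_ne]; omega
      have hfq : List.find? (fun r => r.1 == (p : Int)) [q] = none := by
        simp [List.find?, hb]
      have hcq : List.countP (fun r => decide (r.1 < (p : Int))) [q] = 1 := by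
        simp only [List.countP_cons, List.countP_nil]
        rw [if_pos (by simp only [decide_eq_true_eq]; omega)]
      rw [hget, hfr, hfq, hcq, Option.or_none]
      simp only [Option.map_none, Option.none_or]
      have hih := ihget (p - 1)
      have hfr' : List.find? (fun r => r.1 == ((p - 1 : Nat) : Int)) rest = none := by
        rw [List.find?_eq_none]
        intro a ha
        have := hql a ha
        simp only [beq_iff_eq]
        omega
      rw [hfr'] at hih
      simp only [Option.map_none, Option.none_or] at hih
      rw [hih]
      have hcc : rest.countP (fun r => decide (r.1 < ((p - 1 : Nat) : Int))) =
          rest.countP (fun r => decide (r.1 < (p : Int))) := by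
        apply List.countP_congr
        intro a ha
        have := hql a ha
        constructor <;> intro _ <;> (simp only [decide_eq_true_eq]; omega)
      rw [hcc]
      have hidx : p - 1 - rest.countP (fun r => decide (r.1 < (p : Int))) =
          p - (rest.countP (fun r => decide (r.1 < (p : Int))) + 1) := by
        omega
      rw [hidx]

-- a strictly increasing Int list bounded above by n: L[j] ≤ n - (length - j)
theorem pairwise_lt_getElem_bound (L : List Int) (n : Int)
    (hp : L.Pairwise (· < ·)) (hub : ∀ x ∈ L, x < n) :
    ∀ j (hj : j < L.length), L[j] + ((L.length : Int) - (j : Int)) ≤ n := by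
  induction L with
  | nil => intro j hj; simp at hj
  | cons a l ih =>
    rw [List.pairwise_cons] at hp
    intro j hj
    cases j with
    | zero =>
      cases l with
      | nil =>
        have := hub a (by simp)
        simp only [List.getElem_cons_zero, List.length_cons, List.length_nil]
        omega
      | cons b t =>
        have h0 := ih hp.2 (fun x hx => hub x (List.mem_cons_of_mem _ hx)) 0 (by simp)
        have hab : a < b := hp.1 b (by simp)
        simp only [List.getElem_cons_zero, List.length_cons] at h0 ⊢
        push_cast at h0 ⊢
        omega
    | succ j =>
      have := ih hp.2 (fun x hx => hub x (List.mem_cons_of_mem _ hx)) j (by simpa using hj)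
      simp only [List.getElem_cons_succ, List.length_cons]
      push_cast at this ⊢
      omega

-- Pairwise ≤ on keys plus distinct keys gives Pairwise <
theorem pairwise_lt_of_le_nodup {α : Type} (L : List α) (key : α → Int)
    (hle : L.Pairwise (fun a b => key a ≤ key b)) (hnd : (L.map key).Nodup) :
    L.Pairwise (fun a b => key a < key b) := by
  induction L with
  | nil => exact List.Pairwise.nil
  | cons a l ih =>
    rw [List.pairwise_cons] at hle ⊢
    rw [List.map_cons, List.nodup_cons] at hnd
    exact ⟨fun b hb => lt_of_le_of_ne (hle.1 b hb)
        (fun h => hnd.1 (h ▸ List.mem_map_of_mem hb)), ih hle.2 hnd.2⟩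

-- a nodup list filtered by membership in a nodup subset is a permutation of the subset
theorem filter_mem_perm (R S : List Int) (hR : R.Nodup) (hS : S.Nodup)
    (hsub : ∀ x ∈ S, x ∈ R) :
    (R.filter (fun x => decide (x ∈ S))).Perm S := by
  rw [List.perm_ext_iff_of_nodup (hR.filter _) hS]
  intro a
  simp only [List.mem_filter, decide_eq_true_eq]
  exact ⟨fun h => h.2, fun h => ⟨hsub a h, h⟩⟩

-- splitting a filtered range at a selected point
theorem filter_pyRange_split (n p : Int) (Q : Int → Bool)
    (h0 : 0 ≤ p) (hpn : p < n) (hQ : Q p = true) :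
    (PySem.List.pyRange 0 n 1).filter Q =
      (PySem.List.pyRange 0 p 1).filter Q ++ p :: (PySem.List.pyRange (p+1) n 1).filter Q := by
  rw [PySem.List.pyRange_one_append 0 p n h0 (le_of_lt hpn)]
  rw [PySem.List.pyRange_one_cons hpn]
  rw [List.filter_append, List.filter_cons, if_pos hQ]

-- the zip of two equal-length lists filtered on an element occurring once in the second
theorem zip_filter_eq_pair (xs H1 H2 : List Int) (p : Int)
    (hlen : xs.length = H1.length + 1 + H2.length)
    (h1 : p ∉ H1) (h2 : p ∉ H2) :
    ((xs.zip (H1 ++ p :: H2)).filter (fun q => q.2 == p)).map Prod.fst =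
      [xs[H1.length]'(by omega)] := by
  have hj : H1.length < xs.length := by omega
  have hx : xs = xs.take H1.length ++ xs[H1.length] :: xs.drop (H1.length + 1) := by
    conv_lhs => rw [← List.take_append_drop H1.length xs]
    rw [List.drop_eq_getElem_cons hj]
  have htl : (xs.take H1.length).length = H1.length := by
    rw [List.length_take]; omega
  conv_lhs => rw [hx]
  rw [List.zip_append (by rw [htl])]
  rw [List.zip_cons_cons]
  rw [List.filter_append, List.filter_cons]
  have hz1 : ((xs.take H1.length).zip H1).filter (fun q => q.2 == p) = [] := by
    rw [List.filter_eq_nil_iff]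
    intro q hq
    have := (List.of_mem_zip hq).2
    simp only [beq_iff_eq]
    exact fun h => h1 (h ▸ this)
  have hz2 : ((xs.drop (H1.length + 1)).zip H2).filter (fun q => q.2 == p) = [] := by
    rw [List.filter_eq_nil_iff]
    intro q hq
    have := (List.of_mem_zip hq).2
    simp only [beq_iff_eq]
    exact fun h => h2 (h ▸ this)
  simp [hz1, hz2]

-- A = B position by position, under the precondition
theorem movedim_eq_aux (n : Int) (input dst : List Int)
    (hlen : input.length = dst.length) (hndi : input.Nodup)
    (hbi : ∀ i ∈ input, 0 ≤ i ∧ i < n)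
    (hbd : ∀ d ∈ dst, -n ≤ d ∧ d < n)
    (hndD : (dst.map (fun d => PySem.Int.mod d n)).Nodup)
    (hnpos : 0 < n) :
    dim_movedim n input dst = dim_movedim_alt n input dst := by
  simp only [dim_movedim, dim_movedim_alt]
  rw [← spare_filter_eq n input]
  have hzlen : (input.zip dst).length = input.length := by
    rw [List.length_zip, hlen, Nat.min_self]
  have hzbd : ∀ q ∈ input.zip dst, -n ≤ q.2 ∧ q.2 < n := fun q hq => hbd q.2 (List.of_mem_zip hq).2
  have hzfst : ∀ q ∈ input.zip dst, q.1 ∈ input := fun q hq => (List.of_mem_zip hq).1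
  have hd0len : (((List.replicate n.toNat (-1 : Int))).length : Int) = n := by
    simp; omega
  have hfold := fun (p : Nat) => fold_pySetD_getElem? n (input.zip dst) (List.replicate n.toNat (-1)) p hd0len hzbd
  have hfilllen : (List.foldl (fun dest q => PySem.List.pySetD dest q.2 q.1) (List.replicate n.toNat (-1)) (input.zip dst)).length = n.toNat := by
    rw [(hfold 0).1, List.length_replicate]
  have hbridge : ∀ c : Int,
      ((List.filter (fun q => PySem.Int.mod q.2 n == c) (input.zip dst)).map Prod.fst) =
      ((List.filter (fun q => q.1 == c) (List.map (fun q => (PySem.Int.mod q.2 n, q.1)) (input.zip dst))).map Prod.snd) := by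
    intro c
    rw [List.filter_map, List.map_map]
    rfl
  have hsnd : ((input.zip dst).map Prod.snd) = dst := List.map_snd_zip (le_of_eq hlen.symm)
  have hDfst : ((List.map (fun q => (PySem.Int.mod q.2 n, q.1)) (input.zip dst)).map Prod.fst) = (List.map (fun d => PySem.Int.mod d n) dst) := by
    rw [List.map_map]
    conv_rhs => rw [← hsnd, List.map_map]
    rfl
  have hmemp0 : ∀ q ∈ (List.map (fun q => (PySem.Int.mod q.2 n, q.1)) (input.zip dst)), ((0 ≤ q.1 ∧ q.1 < n) ∧ q.2 ∈ input) := by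
    intro q hq
    obtain ⟨z, hz, rfl⟩ := List.mem_map.mp hq
    exact ⟨⟨PySem.Int.mod_nonneg _ hnpos, PySem.Int.mod_lt _ hnpos⟩, hzfst z hz⟩
  have hfstD : ∀ q ∈ (List.map (fun q => (PySem.Int.mod q.2 n, q.1)) (input.zip dst)), q.1 ∈ (List.map (fun d => PySem.Int.mod d n) dst) := by
    intro q hq
    rw [← hDfst]
    exact List.mem_map_of_mem hq
  have hDexists : ∀ c : Int, c ∈ (List.map (fun d => PySem.Int.mod d n) dst) → ∃ q ∈ (List.map (fun q => (PySem.Int.mod q.2 n, q.1)) (input.zip dst)), q.1 = c := by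
    intro c hc
    rw [← hDfst] at hc
    obtain ⟨q, hq, hq1⟩ := List.mem_map.mp hc
    exact ⟨q, hq, hq1⟩
  have hfillget : ∀ p : Nat, p < n.toNat →
      (List.foldl (fun dest q => PySem.List.pySetD dest q.2 q.1) (List.replicate n.toNat (-1)) (input.zip dst))[p]? =
      (((List.filter (fun q => q.1 == ((p : Nat) : Int)) (List.map (fun q => (PySem.Int.mod q.2 n, q.1)) (input.zip dst))).map Prod.snd).getLast?).or (some (-1)) := by
    intro p hp
    have h := (hfold p).2 (by rw [List.length_replicate]; exact hp)
    rw [hbridge ((p : Nat) : Int)] at h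
    rw [h, List.getElem?_replicate, if_pos hp]
  have hfillval : ∀ p : Nat, p < n.toNat →
      PySem.List.pyGetD (List.foldl (fun dest q => PySem.List.pySetD dest q.2 q.1) (List.replicate n.toNat (-1)) (input.zip dst)) ((p : Nat) : Int) 0 =
      ((((List.filter (fun q => q.1 == ((p : Nat) : Int)) (List.map (fun q => (PySem.Int.mod q.2 n, q.1)) (input.zip dst))).map Prod.snd).getLast?).getD (-1)) := by
    intro p hp
    rw [PySem.List.pyGetD_natCast, List.getD_eq_getElem?_getD, hfillget p hp]
    cases ((List.filter (fun q => q.1 == ((p : Nat) : Int)) (List.map (fun q => (PySem.Int.mod q.2 n, q.1)) (input.zip dst))).map Prod.snd).getLast? <;> rfl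
  have hQ : ∀ c : Int, 0 ≤ c → c < n →
      (PySem.List.pyGetD (List.foldl (fun dest q => PySem.List.pySetD dest q.2 q.1) (List.replicate n.toNat (-1)) (input.zip dst)) c 0 == -1) = !decide (c ∈ (List.map (fun d => PySem.Int.mod d n) dst)) := by
    intro c h0 h1
    have hp' : c = ((c.toNat : Nat) : Int) := by omega
    rw [hp', hfillval c.toNat (by omega)]
    rcases hf : (List.filter (fun q => q.1 == ((c.toNat : Nat) : Int)) (List.map (fun q => (PySem.Int.mod q.2 n, q.1)) (input.zip dst))) with _ | ⟨q, t⟩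
    · have hnotin : ¬ (((c.toNat : Nat) : Int) ∈ (List.map (fun d => PySem.Int.mod d n) dst)) := by
        intro hc
        obtain ⟨q, hq, hq1⟩ := hDexists _ hc
        have hmem : q ∈ (List.filter (fun q => q.1 == ((c.toNat : Nat) : Int)) (List.map (fun q => (PySem.Int.mod q.2 n, q.1)) (input.zip dst))) :=
          List.mem_filter.mpr ⟨hq, by simp [hq1]⟩
        rw [hf] at hmem
        simp at hmem
      rw [hf]
      simp only [List.map_nil, List.getLast?_nil, Option.getD_none, hnotin, decide_false,
        Bool.not_false]
      decide
    · rcases hlast : ((q :: t).map Prod.snd).getLast? with _ | w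
      · rw [List.getLast?_eq_none_iff] at hlast
        simp at hlast
      · have hw : w ∈ (q :: t).map Prod.snd := List.mem_of_getLast? hlast
        obtain ⟨r, hr, rfl⟩ := List.mem_map.mp hw
        have hrf : r ∈ (List.filter (fun q => q.1 == ((c.toNat : Nat) : Int)) (List.map (fun q => (PySem.Int.mod q.2 n, q.1)) (input.zip dst))) := by
          rw [hf]; exact hr
        have hrp := List.mem_filter.mp hrf
        have hr2 := (hmemp0 r hrp.1).2
        have hr0 : 0 ≤ r.2 := (hbi r.2 hr2).1
        have hqf : q ∈ (List.filter (fun q => q.1 == ((c.toNat : Nat) : Int)) (List.map (fun q => (PySem.Int.mod q.2 n, q.1)) (input.zip dst))) := by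
          rw [hf]; exact List.mem_cons_self
        have hqp := List.mem_filter.mp hqf
        have hcD : ((c.toNat : Nat) : Int) ∈ (List.map (fun d => PySem.Int.mod d n) dst) := by
          have := hfstD q hqp.1
          rwa [beq_iff_eq.mp hqp.2] at this
        rw [hf, hlast]
        simp only [Option.getD_some, hcD, decide_true, Bool.not_true]
        rw [beq_eq_false_iff_ne]
        omega
  have hholes : List.filter (fun i => PySem.List.pyGetD (List.foldl (fun dest q => PySem.List.pySetD dest q.2 q.1) (List.replicate n.toNat (-1)) (input.zip dst)) i 0 == -1) (PySem.List.pyRange 0 n)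
      = (List.filter (fun p => !decide (p ∈ (List.map (fun d => PySem.Int.mod d n) dst))) (PySem.List.pyRange 0 n)) := by
    apply List.filter_congr
    intro i hi
    have hb := PySem.List.mem_pyRange_one.mp hi
    exact hQ i hb.1 hb.2
  have hrnlen : (PySem.List.pyRange 0 n).length = n.toNat := by
    rw [PySem.List.pyRange_one]; simp
  have hcntS : ∀ S : List Int, S.Nodup → (∀ x ∈ S, 0 ≤ x ∧ x < n) →
      ((List.filter (fun x => decide (x ∈ S)) (PySem.List.pyRange 0 n)).length = S.length) := by
    intro S h1 h2
    exact (filter_mem_perm _ S (PySem.List.nodup_pyRange_one 0 n) h1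
      (fun x hx => PySem.List.mem_pyRange_one.mpr ⟨(h2 x hx).1, (h2 x hx).2⟩)).length_eq
  have hklen : ((List.filter (fun x => decide (x ∈ input)) (PySem.List.pyRange 0 n)).length = input.length) :=
    hcntS input hndi hbi
  have hDbounds : ∀ x ∈ (List.map (fun d => PySem.Int.mod d n) dst), 0 ≤ x ∧ x < n := by
    intro x hx
    obtain ⟨d, hd, rfl⟩ := List.mem_map.mp hx
    exact ⟨PySem.Int.mod_nonneg _ hnpos, PySem.Int.mod_lt _ hnpos⟩
  have hDlen : ((List.map (fun d => PySem.Int.mod d n) dst)).length = input.length := by rw [List.length_map, hlen]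
  have hDcnt : ((List.filter (fun x => decide (x ∈ (List.map (fun d => PySem.Int.mod d n) dst))) (PySem.List.pyRange 0 n)).length = input.length) := by
    rw [hcntS _ hndD hDbounds, hDlen]
  have hsparelen : (List.filter (fun s => !decide (s ∈ input)) (PySem.List.pyRange 0 n)).length = n.toNat - input.length := by
    have h := List.length_eq_length_filter_add (l := PySem.List.pyRange 0 n) (fun s => decide (s ∈ input))
    beta_reduce at h
    omega
  have hholeslen : (List.filter (fun p => !decide (p ∈ (List.map (fun d => PySem.Int.mod d n) dst))) (PySem.List.pyRange 0 n)).length = n.toNat - input.length := by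
    have h := List.length_eq_length_filter_add (l := PySem.List.pyRange 0 n) (fun x => decide (x ∈ (List.map (fun d => PySem.Int.mod d n) dst)))
    beta_reduce at h
    omega
  have hkle : input.length ≤ n.toNat := by
    have := List.length_filter_le (fun x => decide (x ∈ input)) (PySem.List.pyRange 0 n)
    omega
  rw [scan_eq_zip_assign (PySem.List.pyRange 0 n) (List.foldl (fun dest q => PySem.List.pySetD dest q.2 q.1) (List.replicate n.toNat (-1)) (input.zip dst)) (List.filter (fun s => !decide (s ∈ input)) (PySem.List.pyRange 0 n))
      (PySem.List.nodup_pyRange_one 0 n)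
      (fun i hi => by
        have hb := PySem.List.mem_pyRange_one.mp hi
        exact ⟨hb.1, by rw [hfilllen]; omega⟩)
      (by rw [hholes]; omega)]
  rw [hholes]
  -- B-side structure
  have hperm : (PySem.List.sorted (List.map (fun q => (PySem.Int.mod q.2 n, q.1)) (input.zip dst)) (fun pair => pair.1)).Perm (List.map (fun q => (PySem.Int.mod q.2 n, q.1)) (input.zip dst)) := PySem.List.sorted_perm _ _ _
  have hmfstnd : ((PySem.List.sorted (List.map (fun q => (PySem.Int.mod q.2 n, q.1)) (input.zip dst)) (fun pair => pair.1)).map Prod.fst).Nodup := by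
    have h2 := (hperm.map Prod.fst).nodup_iff
    rw [hDfst] at h2
    exact h2.mpr hndD
  have hplt : (PySem.List.sorted (List.map (fun q => (PySem.Int.mod q.2 n, q.1)) (input.zip dst)) (fun pair => pair.1)).Pairwise (fun a b => a.1 < b.1) :=
    pairwise_lt_of_le_nodup _ (fun pair : Int × Int => pair.1) (PySem.List.sorted_pairwise _ _) hmfstnd
  have hmovlen : (PySem.List.sorted (List.map (fun q => (PySem.Int.mod q.2 n, q.1)) (input.zip dst)) (fun pair => pair.1)).length = input.length := by
    rw [PySem.List.length_sorted, List.length_map, hzlen]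
  have hmmem : ∀ q ∈ (PySem.List.sorted (List.map (fun q => (PySem.Int.mod q.2 n, q.1)) (input.zip dst)) (fun pair => pair.1)), ((0 ≤ q.1 ∧ q.1 < n) ∧ q.2 ∈ input) :=
    fun q hq => hmemp0 q (hperm.mem_iff.mp hq)
  have hmfstD : ∀ q ∈ (PySem.List.sorted (List.map (fun q => (PySem.Int.mod q.2 n, q.1)) (input.zip dst)) (fun pair => pair.1)), q.1 ∈ (List.map (fun d => PySem.Int.mod d n) dst) :=
    fun q hq => hfstD q (hperm.mem_iff.mp hq)
  have hfstpl : ((PySem.List.sorted (List.map (fun q => (PySem.Int.mod q.2 n, q.1)) (input.zip dst)) (fun pair => pair.1)).map Prod.fst).Pairwise (· < ·) := List.pairwise_map.mpr hplt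
  have hub : ∀ x ∈ (PySem.List.sorted (List.map (fun q => (PySem.Int.mod q.2 n, q.1)) (input.zip dst)) (fun pair => pair.1)).map Prod.fst, x < n := by
    intro x hx
    obtain ⟨q, hq, rfl⟩ := List.mem_map.mp hx
    exact (hmmem q hq).1.2
  have hbndm : ∀ j (hj : j < (PySem.List.sorted (List.map (fun q => (PySem.Int.mod q.2 n, q.1)) (input.zip dst)) (fun pair => pair.1)).length), ((PySem.List.sorted (List.map (fun q => (PySem.Int.mod q.2 n, q.1)) (input.zip dst)) (fun pair => pair.1))[j]).1 ≤ ((List.filter (fun s => !decide (s ∈ input)) (PySem.List.pyRange 0 n)).length : Int) + j := by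
    intro j hj
    have hj' : j < ((PySem.List.sorted (List.map (fun q => (PySem.Int.mod q.2 n, q.1)) (input.zip dst)) (fun pair => pair.1)).map Prod.fst).length := by rw [List.length_map]; exact hj
    have hb := pairwise_lt_getElem_bound ((PySem.List.sorted (List.map (fun q => (PySem.Int.mod q.2 n, q.1)) (input.zip dst)) (fun pair => pair.1)).map Prod.fst) n hfstpl hub j hj'
    rw [List.getElem_map] at hb
    have hlm : ((PySem.List.sorted (List.map (fun q => (PySem.Int.mod q.2 n, q.1)) (input.zip dst)) (fun pair => pair.1)).map Prod.fst).length = input.length := by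
      rw [List.length_map, hmovlen]
    have hjk : j < input.length := by rw [hmovlen] at hj; exact hj
    rw [hsparelen]
    omega
  have hBchar := insert_fold_char (PySem.List.sorted (List.map (fun q => (PySem.Int.mod q.2 n, q.1)) (input.zip dst)) (fun pair => pair.1)) (List.filter (fun s => !decide (s ∈ input)) (PySem.List.pyRange 0 n)) hplt (fun q hq => (hmmem q hq).1.1) hbndm
  have hzbd2 : ∀ q ∈ ((List.filter (fun s => !decide (s ∈ input)) (PySem.List.pyRange 0 n)).zip (List.filter (fun p => !decide (p ∈ (List.map (fun d => PySem.Int.mod d n) dst))) (PySem.List.pyRange 0 n))), -n ≤ q.2 ∧ q.2 < n := by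
    intro q hq
    have h2 := (List.of_mem_zip hq).2
    have h3 := List.mem_filter.mp h2
    have hb := PySem.List.mem_pyRange_one.mp h3.1
    exact ⟨by omega, hb.2⟩
  have hAc := fun (p : Nat) => fold_pySetD_getElem? n ((List.filter (fun s => !decide (s ∈ input)) (PySem.List.pyRange 0 n)).zip (List.filter (fun p => !decide (p ∈ (List.map (fun d => PySem.Int.mod d n) dst))) (PySem.List.pyRange 0 n))) (List.foldl (fun dest q => PySem.List.pySetD dest q.2 q.1) (List.replicate n.toNat (-1)) (input.zip dst)) p
    (by rw [hfilllen]; omega) hzbd2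
  apply List.ext_getElem?
  intro p
  rw [hBchar.2 p]
  by_cases hp : p < n.toNat
  · have hA := (hAc p).2 (by rw [hfilllen]; exact hp)
    rw [hA]
    by_cases hcD : (((p : Nat) : Int) ∈ (List.map (fun d => PySem.Int.mod d n) dst))
    · -- a moved position: both sides give the unique source landing there
      obtain ⟨q, hqmem, hq1⟩ := hDexists _ hcD
      have hfilsing : List.filter (fun r => r.1 == ((p : Nat) : Int)) (List.map (fun q => (PySem.Int.mod q.2 n, q.1)) (input.zip dst)) = [q] :=
        filter_fst_eq_singleton _ _ (by rw [hDfst]; exact hndD) q hqmem hq1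
      have hfind : (PySem.List.sorted (List.map (fun q => (PySem.Int.mod q.2 n, q.1)) (input.zip dst)) (fun pair => pair.1)).find? (fun r => r.1 == ((p : Nat) : Int)) = some q := by
        rw [← List.head?_filter]
        rw [filter_fst_eq_singleton (PySem.List.sorted (List.map (fun q => (PySem.Int.mod q.2 n, q.1)) (input.zip dst)) (fun pair => pair.1)) ((p : Nat) : Int) hmfstnd q (hperm.mem_iff.mpr hqmem) hq1]
        rfl
      have hznil : (((List.filter (fun s => !decide (s ∈ input)) (PySem.List.pyRange 0 n)).zip (List.filter (fun p => !decide (p ∈ (List.map (fun d => PySem.Int.mod d n) dst))) (PySem.List.pyRange 0 n))).filter (fun r => PySem.Int.mod r.2 n == ((p : Nat) : Int))) = [] := by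
        rw [List.filter_eq_nil_iff]
        intro r hr
        have h2 := (List.of_mem_zip hr).2
        have h3 := List.mem_filter.mp h2
        have hb := PySem.List.mem_pyRange_one.mp h3.1
        have hmod : PySem.Int.mod r.2 n = r.2 := by
          rw [PySem.Int.mod_eq_emod_of_pos hnpos]
          exact Int.emod_eq_of_lt hb.1 hb.2
        simp only [hmod, beq_iff_eq]
        intro hrp
        rw [hrp] at h3
        simp [hcD] at h3
      rw [hznil, hfind, hfillget p hp, hfilsing]
      rfl
    · -- a hole position: both sides give the matching spare source
      have hfind : (PySem.List.sorted (List.map (fun q => (PySem.Int.mod q.2 n, q.1)) (input.zip dst)) (fun pair => pair.1)).find? (fun r => r.1 == ((p : Nat) : Int)) = none :=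
        List.find?_eq_none.mpr (fun r hr => by
          simp only [beq_iff_eq]
          intro h
          exact hcD (by rw [← h]; exact hmfstD r hr))
      have hQc : (fun x => !decide (x ∈ (List.map (fun d => PySem.Int.mod d n) dst))) ((p : Nat) : Int) = true := by simp [hcD]
      have hsplit := filter_pyRange_split n ((p : Nat) : Int) (fun x => !decide (x ∈ (List.map (fun d => PySem.Int.mod d n) dst)))
        (by positivity) (by omega) hQc
      have hH1p : ((p : Nat) : Int) ∉ (List.filter (fun x => !decide (x ∈ (List.map (fun d => PySem.Int.mod d n) dst))) (PySem.List.pyRange 0 ((p : Nat) : Int))) := by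
        intro hmem
        have hb := PySem.List.mem_pyRange_one.mp (List.mem_filter.mp hmem).1
        omega
      have hH2p : ((p : Nat) : Int) ∉ (List.filter (fun x => !decide (x ∈ (List.map (fun d => PySem.Int.mod d n) dst))) (PySem.List.pyRange (((p : Nat) : Int)+1) n)) := by
        intro hmem
        have hb := PySem.List.mem_pyRange_one.mp (List.mem_filter.mp hmem).1
        omega
      have hlensplit : (List.filter (fun s => !decide (s ∈ input)) (PySem.List.pyRange 0 n)).length = (List.filter (fun x => !decide (x ∈ (List.map (fun d => PySem.Int.mod d n) dst))) (PySem.List.pyRange 0 ((p : Nat) : Int))).length + 1 + (List.filter (fun x => !decide (x ∈ (List.map (fun d => PySem.Int.mod d n) dst))) (PySem.List.pyRange (((p : Nat) : Int)+1) n)).length := by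
        rw [hsplit] at hholeslen
        rw [List.length_append, List.length_cons] at hholeslen
        omega
      rw [hsplit]
      have hmodeq : (((List.filter (fun s => !decide (s ∈ input)) (PySem.List.pyRange 0 n)).zip ((List.filter (fun x => !decide (x ∈ (List.map (fun d => PySem.Int.mod d n) dst))) (PySem.List.pyRange 0 ((p : Nat) : Int))) ++ ((p : Nat) : Int) :: (List.filter (fun x => !decide (x ∈ (List.map (fun d => PySem.Int.mod d n) dst))) (PySem.List.pyRange (((p : Nat) : Int)+1) n)))).filter (fun r => PySem.Int.mod r.2 n == ((p : Nat) : Int)))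
          = (((List.filter (fun s => !decide (s ∈ input)) (PySem.List.pyRange 0 n)).zip ((List.filter (fun x => !decide (x ∈ (List.map (fun d => PySem.Int.mod d n) dst))) (PySem.List.pyRange 0 ((p : Nat) : Int))) ++ ((p : Nat) : Int) :: (List.filter (fun x => !decide (x ∈ (List.map (fun d => PySem.Int.mod d n) dst))) (PySem.List.pyRange (((p : Nat) : Int)+1) n)))).filter (fun r => r.2 == ((p : Nat) : Int))) := by
        apply List.filter_congr
        intro r hr
        have h2 := (List.of_mem_zip hr).2
        have hbnd : 0 ≤ r.2 ∧ r.2 < n := by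
          rcases List.mem_append.mp h2 with hm | hm
          · have hb := PySem.List.mem_pyRange_one.mp (List.mem_filter.mp hm).1
            constructor
            · exact hb.1
            · have : ((p : Nat) : Int) < n := by omega
              omega
          · rcases List.mem_cons.mp hm with hm0 | hm'
            · constructor
              · rw [hm0]; positivity
              · rw [hm0]; omega
            · have hb := PySem.List.mem_pyRange_one.mp (List.mem_filter.mp hm').1
              constructor
              · omega
              · exact hb.2
        have hmod : PySem.Int.mod r.2 n = r.2 := by
          rw [PySem.Int.mod_eq_emod_of_pos hnpos]
          exact Int.emod_eq_of_lt hbnd.1 hbnd.2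
        rw [hmod]
      rw [hmodeq, zip_filter_eq_pair (List.filter (fun s => !decide (s ∈ input)) (PySem.List.pyRange 0 n)) (List.filter (fun x => !decide (x ∈ (List.map (fun d => PySem.Int.mod d n) dst))) (PySem.List.pyRange 0 ((p : Nat) : Int))) (List.filter (fun x => !decide (x ∈ (List.map (fun d => PySem.Int.mod d n) dst))) (PySem.List.pyRange (((p : Nat) : Int)+1) n)) ((p : Nat) : Int) hlensplit hH1p hH2p]
      rw [hfind]
      -- index arithmetic: position of the hole among the spares
      have hcntm : (PySem.List.sorted (List.map (fun q => (PySem.Int.mod q.2 n, q.1)) (input.zip dst)) (fun pair => pair.1)).countP (fun r => decide (r.1 < ((p : Nat) : Int)))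
          = ((List.map (fun d => PySem.Int.mod d n) dst)).countP (fun x => decide (x < ((p : Nat) : Int))) := by
        rw [hperm.countP_eq]
        rw [← hDfst, List.countP_map, List.countP_map, List.countP_map]
        rfl
      have hlenr : (PySem.List.pyRange 0 ((p : Nat) : Int)).length = p := by
        rw [PySem.List.pyRange_one]; simp
      have hcong : List.filter (fun x => decide (x ∈ (List.map (fun d => PySem.Int.mod d n) dst))) (PySem.List.pyRange 0 ((p : Nat) : Int))
          = List.filter (fun x => decide (x ∈ ((List.map (fun d => PySem.Int.mod d n) dst)).filter (fun y => decide (y < ((p : Nat) : Int))))) (PySem.List.pyRange 0 ((p : Nat) : Int)) := by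
        apply List.filter_congr
        intro x hx
        have hb := PySem.List.mem_pyRange_one.mp hx
        simp only [List.mem_filter, decide_eq_true_eq, decide_eq_decide]
        constructor
        · intro h
          exact ⟨h, by simp [hb.2]⟩
        · intro h
          exact h.1
      have hposlen : (List.filter (fun x => decide (x ∈ (List.map (fun d => PySem.Int.mod d n) dst))) (PySem.List.pyRange 0 ((p : Nat) : Int))).length
          = (((List.map (fun d => PySem.Int.mod d n) dst)).filter (fun y => decide (y < ((p : Nat) : Int)))).length := by
        rw [hcong]
        refine (filter_mem_perm _ _ (PySem.List.nodup_pyRange_one 0 ((p : Nat) : Int)) (hndD.filter _) ?_).length_eq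
        intro x hx
        have hm := List.mem_filter.mp hx
        have hb := hDbounds x hm.1
        have hxp : x < ((p : Nat) : Int) := by
          have := hm.2
          simpa using this
        exact PySem.List.mem_pyRange_one.mpr ⟨hb.1, hxp⟩
      have hH1len : (List.filter (fun x => !decide (x ∈ (List.map (fun d => PySem.Int.mod d n) dst))) (PySem.List.pyRange 0 ((p : Nat) : Int))).length = p - ((List.map (fun d => PySem.Int.mod d n) dst)).countP (fun y => decide (y < ((p : Nat) : Int))) := by
        have h := List.length_eq_length_filter_add (l := PySem.List.pyRange 0 ((p : Nat) : Int)) (fun x => decide (x ∈ (List.map (fun d => PySem.Int.mod d n) dst)))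
        beta_reduce at h
        rw [List.countP_eq_length_filter]
        omega
      have hidx : p - (PySem.List.sorted (List.map (fun q => (PySem.Int.mod q.2 n, q.1)) (input.zip dst)) (fun pair => pair.1)).countP (fun r => decide (r.1 < ((p : Nat) : Int))) = (List.filter (fun x => !decide (x ∈ (List.map (fun d => PySem.Int.mod d n) dst))) (PySem.List.pyRange 0 ((p : Nat) : Int))).length := by
        rw [hcntm, hH1len]
      rw [hidx]
      have hH1lt : (List.filter (fun x => !decide (x ∈ (List.map (fun d => PySem.Int.mod d n) dst))) (PySem.List.pyRange 0 ((p : Nat) : Int))).length < (List.filter (fun s => !decide (s ∈ input)) (PySem.List.pyRange 0 n)).length := by omega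
      rw [List.getElem?_eq_getElem hH1lt]
      rfl
  · -- p past the end: both sides are out of range
    have hAn : (((List.filter (fun s => !decide (s ∈ input)) (PySem.List.pyRange 0 n)).zip (List.filter (fun p => !decide (p ∈ (List.map (fun d => PySem.Int.mod d n) dst))) (PySem.List.pyRange 0 n))).foldl (fun pl q => PySem.List.pySetD pl q.2 q.1) (List.foldl (fun dest q => PySem.List.pySetD dest q.2 q.1) (List.replicate n.toNat (-1)) (input.zip dst)))[p]? = none := by
      apply List.getElem?_eq_none
      rw [(hAc 0).1, hfilllen]
      omega
    rw [hAn]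
    have hfind : (PySem.List.sorted (List.map (fun q => (PySem.Int.mod q.2 n, q.1)) (input.zip dst)) (fun pair => pair.1)).find? (fun r => r.1 == ((p : Nat) : Int)) = none :=
      List.find?_eq_none.mpr (fun r hr => by
        simp only [beq_iff_eq]
        intro h
        have hlt := (hmmem r hr).1.2
        omega)
    rw [hfind]
    symm
    simp only [Option.map_none, Option.none_or]
    apply List.getElem?_eq_none
    have hc : (PySem.List.sorted (List.map (fun q => (PySem.Int.mod q.2 n, q.1)) (input.zip dst)) (fun pair => pair.1)).countP (fun r => decide (r.1 < ((p : Nat) : Int))) ≤ (PySem.List.sorted (List.map (fun q => (PySem.Int.mod q.2 n, q.1)) (input.zip dst)) (fun pair => pair.1)).length :=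
      List.countP_le_length
    rw [hmovlen] at hc
    rw [hsparelen]
    omega

-- ===== VERDICT (by name: the statement is the Claim_ definition above) =====
theorem dim_movedim_spec : Claim_equal_dim_movedim := by
  intro n input dst hdom hpre
  obtain ⟨hne, hlen, hndi, _hndd, hbi, hbd, hndD⟩ := hpre
  unfold Spec_dim_movedim
  obtain ⟨i0, hi0⟩ := List.exists_mem_of_ne_nil input hne
  have hnpos : 0 < n := by have := hbi i0 hi0; omega
  exact movedim_eq_aux n input dst hlen hndi hbi hbd hndD hnpos
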